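-- pv_equiv track=rewrite | github.com/anemenman/py-puzz-cr | puzz_015_itkata/k020_the_position_of_a_digital_string_in_a_infinite_digital_string.py | num_index
-- ===== SOURCE A (Python) =====
-- from itertools import count
--
-- def num_index(n):
--     if n < 10:
--         return n - 1
--     c = 0
--     for i in count(1):
--         c += i * 9 * 10 ** (i - 1)
--         if n < 10 ** (i + 1):
--             return c + (i + 1) * (n - 10 ** i)
-- ===== SOURCE B (Python) =====
-- def num_index(n):
--     if n < 10:
--         return n - 1
--     d = len(str(int(n)))
--     s = (1 - d * 10 ** (d - 1) + (d - 1) * 10 ** d) // 9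
--     return s + d * (n - 10 ** (d - 1))
-- ===== Notes on version B (the rewrite author's own statement) =====
-- stated objective: simpler
-- what changed: Replaces A's running-sum loop over digit lengths with a direct closed form: digit length d = len(str(int(n))) and the cumulative digit count S = (1 - d*10**(d-1) + (d-1)*10**d) // 9, returning S + d*(n - 10**(d-1)) with no loop.
import Mathlib
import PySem

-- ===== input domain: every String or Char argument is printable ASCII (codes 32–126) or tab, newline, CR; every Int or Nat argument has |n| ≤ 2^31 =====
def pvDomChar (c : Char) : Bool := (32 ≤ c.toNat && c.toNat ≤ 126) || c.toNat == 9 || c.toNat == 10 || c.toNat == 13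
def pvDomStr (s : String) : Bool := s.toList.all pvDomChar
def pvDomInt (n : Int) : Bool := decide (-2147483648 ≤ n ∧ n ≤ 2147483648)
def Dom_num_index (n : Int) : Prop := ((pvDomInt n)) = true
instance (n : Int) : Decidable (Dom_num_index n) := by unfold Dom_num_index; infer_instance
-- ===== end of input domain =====

-- B replaces A's running-sum loop with the closed form for the cumulative digit count (objective: simpler — no loop; speed difference not measurable on int inputs).

-- ===== PORT A =====
-- the 'for i in count(1)' loop; terminates because 10^(i+1) eventually exceeds n
def numIndexLoop (n c : Int) (i : Nat) : Int :=
  let c' := c + (i : Int) * 9 * 10 ^ (i - 1)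
  if n < 10 ^ (i + 1) then c' + ((i : Int) + 1) * (n - 10 ^ i)
  else numIndexLoop n c' (i + 1)
termination_by (n + 1 - 10 ^ (i + 1)).toNat
decreasing_by
  have h1 : (10 : Int) ^ (i + 1) < 10 ^ (i + 1 + 1) := by
    have : (10 : Int) ^ (i + 1) * 1 < 10 ^ (i + 1) * 10 := by
      have : (0 : Int) < 10 ^ (i + 1) := by positivity
      omega
    simpa [pow_succ] using this
  omega

def num_index (n : Int) : Int :=
  if n < 10 then n - 1 else numIndexLoop n 0 1

-- ===== PORT B =====
def num_index_alt (n : Int) : Int :=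
  if n < 10 then n - 1
  else
    let d : Int := PySem.Str.len (PySem.Int.toStr n)
    -- Python's 10 ** (d - 1) / 10 ** d with d ≥ 2 here, so the .toNat exponents are exact
    let s : Int := PySem.Int.floordiv (1 - d * 10 ^ (d - 1).toNat + (d - 1) * 10 ^ d.toNat) 9
    s + d * (n - 10 ^ (d - 1).toNat)

-- ===== PRECONDITION & SPEC =====
def Spec_num_index (n : Int) (out : Int) : Prop := out = num_index_alt n
instance (n : Int) (out : Int) : Decidable (Spec_num_index n out) := by unfold Spec_num_index; infer_instance

-- ===== CLAIM (what is proved, stated in full; the proofs are below) =====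
def Claim_equal_num_index : Prop := ∀ (n : Int), Dom_num_index n → Spec_num_index n (num_index n)

-- ===== LEMMAS AND PROOFS =====

-- cumulative digit count: csum i = Σ_{j<i} j*9*10^(j-1)
def csum : Nat → Int
  | 0 => 0
  | i + 1 => csum i + (i : Int) * 9 * 10 ^ (i - 1)

lemma nine_csum : ∀ e : Nat, 9 * csum (e + 1) = 1 - ((e : Int) + 1) * 10 ^ e + (e : Int) * 10 ^ (e + 1) := by
  intro e
  induction e with
  | zero => simp [csum]
  | succ e ih =>
      show 9 * (csum (e + 1) + ((e + 1 : Nat) : Int) * 9 * 10 ^ (e + 1 - 1)) = _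
      have h1 : (e + 1 - 1 : Nat) = e := by omega
      rw [h1]
      push_cast
      rw [show ((10:Int) ^ (e + 1 + 1)) = 10 ^ e * 100 by rw [pow_succ, pow_succ]; ring,
          show ((10:Int) ^ (e + 1)) = 10 ^ e * 10 by rw [pow_succ]]
      rw [show ((10:Int) ^ (e + 1)) = 10 ^ e * 10 by rw [pow_succ]] at ih
      push_cast at ih
      linarith

-- exact length of Nat.toDigits on the digit-count bracket
lemma tdc_len : ∀ (f n e : Nat), n < f → 10 ^ e ≤ n → n < 10 ^ (e + 1) →
    (Nat.toDigitsCore 10 f n []).length = e + 1 := by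
  intro f
  induction f with
  | zero => intro n e h; omega
  | succ f ih =>
      intro n e hf hlo hhi
      rw [Nat.toDigitsCore]
      by_cases h0 : n / 10 = 0
      · have hn10 : n < 10 := by omega
        have he : e = 0 := by
          by_contra h
          have : 10 ^ 1 ≤ 10 ^ e := Nat.pow_le_pow_right (by norm_num) (by omega)
          simp at this; omega
        simp [h0, he]
      · have hn10 : 10 ≤ n := by
          by_contra h
          exact h0 (Nat.div_eq_of_lt (by omega))
        have he1 : 1 ≤ e := by
          by_contra h
          have he0 : e = 0 := by omega
          rw [he0] at hhi; simp at hhi; omega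
        rw [if_neg h0, Nat.toDigitsCore_lens_eq]
        have hlo' : 10 ^ (e - 1) ≤ n / 10 := by
          rw [Nat.le_div_iff_mul_le (by norm_num)]
          calc 10 ^ (e - 1) * 10 = 10 ^ (e - 1 + 1) := by rw [pow_succ]
            _ = 10 ^ e := by congr 1; omega
            _ ≤ n := hlo
        have hhi' : n / 10 < 10 ^ (e - 1 + 1) := by
          rw [Nat.div_lt_iff_lt_mul (by norm_num), ← pow_succ]
          have : (e - 1 + 1 + 1) = e + 1 := by omega
          rw [this]; exact hhi
        have hf' : n / 10 < f := by
          have : n / 10 < n := Nat.div_lt_self (by omega) (by norm_num)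
          omega
        rw [ih (n / 10) (e - 1) hf' hlo' hhi']
        omega

lemma toStr_len (n : Int) (e : Nat) (h1 : (10 : Int) ^ e ≤ n) (h2 : n < 10 ^ (e + 1)) :
    PySem.Str.len (PySem.Int.toStr n) = (e : Int) + 1 := by
  have hn0 : 0 ≤ n := le_trans (by positivity) h1
  have hcast1 : ((10 ^ e : Nat) : Int) = 10 ^ e := by push_cast; ring
  have hcast2 : ((10 ^ (e + 1) : Nat) : Int) = 10 ^ (e + 1) := by push_cast; ring
  have hlo : 10 ^ e ≤ n.toNat := by omega
  have hhi : n.toNat < 10 ^ (e + 1) := by omega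
  have hneg : ¬ n < 0 := by omega
  simp only [PySem.Str.len, PySem.Int.toStr]
  rw [show (String.ofList (PySem.Int.toChars n)).toList = PySem.Int.toChars n from
        PySem.Int.toList_toStr n]
  simp only [PySem.Int.toChars, if_neg hneg, Nat.toDigits]
  rw [tdc_len (n.toNat + 1) n.toNat e (by omega) hlo hhi]
  push_cast; ring

lemma loop_eq (n : Int) (d : Nat) (hlo : (10 : Int) ^ (d - 1) ≤ n) (hhi : n < 10 ^ d) :
    ∀ (k i : Nat) (c : Int), i + k = d - 1 → 1 ≤ i →
      numIndexLoop n c i = c + (csum d - csum i) + (d : Int) * (n - 10 ^ (d - 1)) := by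
  intro k
  induction k with
  | zero =>
      intro i c hik hi1
      have hd : d = i + 1 := by omega
      subst hd
      rw [numIndexLoop]
      simp only [Nat.add_sub_cancel] at hlo hhi ⊢
      rw [if_pos hhi]
      show c + (i : Int) * 9 * 10 ^ (i - 1) + ((i : Int) + 1) * (n - 10 ^ i)
          = c + (csum (i + 1) - csum i) + ((i : Int) + 1) * (n - 10 ^ i)
      have : csum (i + 1) = csum i + (i : Int) * 9 * 10 ^ (i - 1) := rfl
      rw [this]; push_cast; ring
  | succ k ih =>
      intro i c hik hi1
      rw [numIndexLoop]
      have hmono : (10 : Int) ^ (i + 1) ≤ 10 ^ (d - 1) :=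
        pow_le_pow_right₀ (by norm_num) (by omega)
      rw [if_neg (by omega : ¬ n < 10 ^ (i + 1))]
      rw [ih (i + 1) (c + (i : Int) * 9 * 10 ^ (i - 1)) (by omega) (by omega)]
      have : csum (i + 1) = csum i + (i : Int) * 9 * 10 ^ (i - 1) := rfl
      rw [this]; ring

-- ===== VERDICT (by name: the statement is the Claim_ definition above) =====
theorem num_index_spec : Claim_equal_num_index := by
  intro n _
  unfold Spec_num_index num_index num_index_alt
  by_cases hlt : n < 10
  · simp [hlt]
  · simp only [if_neg hlt]
    have hn10 : (10 : Int) ≤ n := by omega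
    set m : Nat := n.toNat with hm
    have hm10 : 10 ≤ m := by omega
    set e : Nat := Nat.log 10 m with he
    have he1 : 1 ≤ e := by
      rw [he, ← Nat.pow_le_iff_le_log (by norm_num) (by omega)]
      simpa using hm10
    have hloN : 10 ^ e ≤ m := Nat.pow_log_le_self 10 (by omega)
    have hhiN : m < 10 ^ (e + 1) := Nat.lt_pow_succ_log_self (by norm_num) m
    have hcast1 : ((10 ^ e : Nat) : Int) = 10 ^ e := by push_cast; ring
    have hcast2 : ((10 ^ (e + 1) : Nat) : Int) = 10 ^ (e + 1) := by push_cast; ring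
    have hlo : (10 : Int) ^ e ≤ n := by omega
    have hhi : n < 10 ^ (e + 1) := by omega
    -- A's side
    have hA : numIndexLoop n 0 1 = (csum (e + 1) - csum 1) + ((e : Int) + 1) * (n - 10 ^ e) := by
      have := loop_eq n (e + 1) (by simpa using hlo) (by simpa using hhi) (e - 1) 1 0
        (by omega) (by omega)
      simpa using this
    have hcsum1 : csum 1 = 0 := by simp [csum]
    -- B's side
    have hd : PySem.Str.len (PySem.Int.toStr n) = (e : Int) + 1 := toStr_len n e hlo hhi
    rw [hd, hA, hcsum1]
    have ht1 : (((e : Int) + 1) - 1).toNat = e := by omega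
    have ht2 : ((e : Int) + 1).toNat = e + 1 := by omega
    rw [ht1, ht2]
    have hdiv : PySem.Int.floordiv (1 - ((e : Int) + 1) * 10 ^ e + (((e : Int) + 1) - 1) * 10 ^ (e + 1)) 9
        = csum (e + 1) := by
      have h9 : (1 : Int) - ((e : Int) + 1) * 10 ^ e + (((e : Int) + 1) - 1) * 10 ^ (e + 1)
          = 9 * csum (e + 1) := by rw [nine_csum]; ring
      rw [h9]
      simp [PySem.Int.floordiv, Int.mul_fdiv_cancel_left _ (by norm_num : (9:Int) ≠ 0)]
    rw [hdiv]
    ring
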